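-- pv_equiv track=rewrite | github.com/harshvk25/tds_project2 | data_processor.py | extract_tables_from_text
-- ===== SOURCE A (Python) =====
-- def extract_tables_from_text(text):
--     """Extract potential tables from text"""
--     lines = text.split('\n')
--     tables = []
--     current_table = []
--
--     for line in lines:
--         # Simple heuristic: lines with multiple spaces or tabs might be tables
--         if '  ' in line or '\t' in line:
--             current_table.append(line)
--         elif current_table:
--             tables.append('\n'.join(current_table))
--             current_table = []
--
--     if current_table:
--         tables.append('\n'.join(current_table))
--
--     return tables
-- ===== SOURCE B (Python) =====
-- def extract_tables_from_text(text):
--     """Extract potential tables from text"""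
--     lines = text.split('\n')
--     n = len(lines)
--     tably = ['  ' in l or '\t' in l for l in lines]
--     starts = [i for i in range(n) if tably[i] and (i == 0 or not tably[i - 1])]
--     ends = [i for i in range(n) if tably[i] and (i == n - 1 or not tably[i + 1])]
--     return ['\n'.join(lines[s:e + 1]) for s, e in zip(starts, ends)]
-- ===== Notes on version B (the rewrite author's own statement) =====
-- stated objective: alternative
-- what changed: Replaces A's streaming accumulator with flush-at-separator and flush-at-end by three staged passes: a boolean mask of table-like lines, the lists of run-start and run-end indices read off the mask, and one slice-and-join per (start, end) pair.
import Mathlib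
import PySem

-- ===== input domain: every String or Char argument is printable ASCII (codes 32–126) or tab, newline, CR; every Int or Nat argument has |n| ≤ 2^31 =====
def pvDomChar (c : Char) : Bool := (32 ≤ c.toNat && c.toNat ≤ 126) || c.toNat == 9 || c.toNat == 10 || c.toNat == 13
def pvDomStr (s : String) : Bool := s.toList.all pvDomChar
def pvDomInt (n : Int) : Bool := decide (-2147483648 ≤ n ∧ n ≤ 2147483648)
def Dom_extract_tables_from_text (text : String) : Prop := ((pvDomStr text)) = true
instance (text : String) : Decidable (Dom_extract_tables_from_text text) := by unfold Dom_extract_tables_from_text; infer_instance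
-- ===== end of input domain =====

-- B recomputes the table blocks by staged passes over indices: a boolean mask per line, the
-- run-start and run-end index lists read off the mask, then one slice-and-join per (start, end)
-- pair — no running accumulator (objective: alternative; same asymptotic cost).

-- ===== PORT A =====
-- "'  ' in line or '\t' in line"
def pvIsTably (line : String) : Bool :=
  PySem.Str.isIn "  " line || PySem.Str.isIn "\t" line

-- the loop body of A's for-loop and the post-loop flush, named
def pvStep (st : List String × List String) (line : String) : List String × List String :=
  if pvIsTably line then (st.1, st.2 ++ [line])
  else if st.2 ≠ [] then (st.1 ++ [PySem.Str.join "\n" st.2], [])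
  else st

def pvFinish (st : List String × List String) : List String :=
  if st.2 ≠ [] then st.1 ++ [PySem.Str.join "\n" st.2] else st.1

def extract_tables_from_text (text : String) : List String :=
  pvFinish (((PySem.Str.split? text "\n").getD []).foldl pvStep ([], []))

-- ===== PORT B =====
def extract_tables_from_text_alt (text : String) : List String :=
  let lines := (PySem.Str.split? text "\n").getD []
  let n : Int := PySem.List.len lines
  let tably := lines.map (fun l => PySem.Str.isIn "  " l || PySem.Str.isIn "\t" l)
  let starts := (PySem.List.pyRange 0 n 1).filter (fun i =>
    PySem.List.pyGetD tably i false && (i == 0 || !(PySem.List.pyGetD tably (i - 1) false)))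
  let ends := (PySem.List.pyRange 0 n 1).filter (fun i =>
    PySem.List.pyGetD tably i false && (i == n - 1 || !(PySem.List.pyGetD tably (i + 1) false)))
  (starts.zip ends).map (fun p =>
    PySem.Str.join "\n" (PySem.List.slice lines (some p.1) (some (p.2 + 1))))

-- ===== PRECONDITION & SPEC =====
def Spec_extract_tables_from_text (text : String) (out : List String) : Prop := out = extract_tables_from_text_alt text
instance (text : String) (out : List String) : Decidable (Spec_extract_tables_from_text text out) := by unfold Spec_extract_tables_from_text; infer_instance

-- ===== CLAIM (what is proved, stated in full; the proofs are below) =====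
def Claim_equal_extract_tables_from_text : Prop := ∀ (text : String), Dom_extract_tables_from_text text → Spec_extract_tables_from_text text (extract_tables_from_text text)

-- ===== LEMMAS AND PROOFS =====

-- the common run decomposition both proofs are routed through (proof layer only)
def pvGroupby (lines : List String) : List (Bool × List String) :=
  match lines with
  | [] => []
  | l :: ls =>
      (pvIsTably l, l :: ls.takeWhile (fun x => pvIsTably x == pvIsTably l)) ::
        pvGroupby (ls.dropWhile (fun x => pvIsTably x == pvIsTably l))
termination_by lines.length
decreasing_by
  simp only [List.length_cons]
  exact Nat.lt_succ_of_le (List.length_dropWhile_le _ _)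

def pvAlt (lines : List String) : List String :=
  (pvGroupby lines).filterMap (fun g => if g.1 then some (PySem.Str.join "\n" g.2) else none)

-- Nat-indexed forms of B's three passes (bridged to the port at the end)
def pvMask (ls : List String) : List Bool := ls.map pvIsTably

def pvF (prev : Bool) (m : List Bool) : List Nat :=
  (List.range m.length).filter
    (fun i => m.getD i false && (if i == 0 then !prev else !(m.getD (i - 1) false)))

def pvE (m : List Bool) : List Nat :=
  (List.range m.length).filter
    (fun i => m.getD i false && (i == m.length - 1 || !(m.getD (i + 1) false)))

def pvCut (ls : List String) (p : Nat × Nat) : String :=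
  PySem.Str.join "\n" ((ls.drop p.1).take (p.2 + 1 - p.1))

def pvB (ls : List String) : List String :=
  ((pvF false (pvMask ls)).zip (pvE (pvMask ls))).map (pvCut ls)

theorem pvJoin_singleton (a : String) : PySem.Str.join "\n" [a] = a := by
  apply String.toList_inj.mp
  simp [PySem.Str.toList_join, PySem.Chars.join_singleton]

theorem pvJoin_cons_cons (a b : String) (rest : List String) :
    PySem.Str.join "\n" (a :: b :: rest) = a ++ "\n" ++ PySem.Str.join "\n" (b :: rest) := by
  apply String.toList_inj.mp
  simp [PySem.Str.toList_join, PySem.Chars.join_cons_cons]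

theorem pvF_cons (prev b : Bool) (m : List Bool) :
    pvF prev (b :: m) = (if b && !prev then [0] else []) ++ (pvF b m).map Nat.succ := by
  unfold pvF
  rw [List.length_cons, List.range_succ_eq_map, List.filter_cons, List.filter_map]
  have hpt : ∀ i ∈ List.range m.length,
      ((fun i => (b :: m).getD i false && (if i == 0 then !prev else !((b :: m).getD (i - 1) false))) ∘ Nat.succ) i
      = (fun i => m.getD i false && (if i == 0 then !b else !(m.getD (i - 1) false))) i := by
    intro i _
    cases i with
    | zero => simp
    | succ j => simp
  rw [List.filter_congr hpt]
  split_ifs with h1 h2 <;> simp_all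

theorem pvE_cons (b : Bool) (m : List Bool) :
    pvE (b :: m) = (if b && !(m.getD 0 false) then [0] else []) ++ (pvE m).map Nat.succ := by
  unfold pvE
  rw [List.length_cons, List.range_succ_eq_map, List.filter_cons, List.filter_map]
  have hpt : ∀ i ∈ List.range m.length,
      ((fun i => (b :: m).getD i false && (i == m.length + 1 - 1 || !((b :: m).getD (i + 1) false))) ∘ Nat.succ) i
      = (fun i => m.getD i false && (i == m.length - 1 || !(m.getD (i + 1) false))) i := by
    intro i hi
    rw [List.mem_range] at hi
    have hlen : m.length = (m.length - 1) + 1 := by omega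
    have h1 : (i.succ == m.length + 1 - 1) = (i == m.length - 1) := by
      rw [hlen]; simp
    simp only [Function.comp_apply, List.getD_cons_succ, h1]
  rw [List.filter_congr hpt]
  have h0 : ((b :: m).getD 0 false && (0 == m.length + 1 - 1 || !((b :: m).getD (0 + 1) false)))
      = (b && !(m.getD 0 false)) := by
    cases m with
    | nil => simp
    | cons c m' => simp
  rw [h0]
  split_ifs <;> simp_all


theorem pvF_of_head_false (prev : Bool) (m : List Bool) (h : m.getD 0 false = false) :
    pvF prev m = pvF false m := by
  cases m with
  | nil => rfl
  | cons b m' =>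
      simp at h
      rw [pvF_cons, pvF_cons, h]
      simp

theorem pvE_ne_nil (m : List Bool) (h : m.getD 0 false = true) : pvE m ≠ [] := by
  induction m with
  | nil => simp at h
  | cons b m' ih =>
      simp at h
      rw [pvE_cons, h]
      cases h0 : m'.getD 0 false with
      | false => simp [h0]
      | true => simpa using ih h0

theorem pvCut_shift (l : String) (ls : List String) (a b : List Nat) :
    ((a.map Nat.succ).zip (b.map Nat.succ)).map (pvCut (l :: ls)) = (a.zip b).map (pvCut ls) := by
  rw [List.zip_map, List.map_map]
  apply List.map_congr_left
  intro p _
  obtain ⟨s, e⟩ := p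
  simp [pvCut, Nat.succ_sub_succ]

theorem pvMask_cons (l : String) (ls : List String) :
    pvMask (l :: ls) = pvIsTably l :: pvMask ls := rfl

theorem pvB_cons_false (l : String) (ls : List String) (h : pvIsTably l = false) :
    pvB (l :: ls) = pvB ls := by
  unfold pvB
  rw [pvMask_cons, h, pvF_cons, pvE_cons]
  simp
  rw [pvCut_shift]

theorem pvB_cons_true_stop (l : String) (ls : List String) (h : pvIsTably l = true)
    (h0 : (pvMask ls).getD 0 false = false) :
    pvB (l :: ls) = l :: pvB ls := by
  unfold pvB
  rw [pvMask_cons, h, pvF_cons, pvE_cons, h0, pvF_of_head_false true _ h0]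
  simp
  refine ⟨?_, ?_⟩
  · simp [pvCut, pvJoin_singleton]
  · rw [pvCut_shift]

theorem pvB_cons_true_true (l l' : String) (ls' : List String) (h : pvIsTably l = true)
    (h' : pvIsTably l' = true) :
    ∃ hh tt, pvB (l' :: ls') = hh :: tt ∧ pvB (l :: l' :: ls') = (l ++ "\n" ++ hh) :: tt := by
  have hm : pvMask (l' :: ls') = true :: pvMask ls' := by rw [pvMask_cons, h']
  have hE : pvE (true :: pvMask ls') ≠ [] := pvE_ne_nil _ (by simp)
  obtain ⟨e, es, hEeq⟩ := List.exists_cons_of_ne_nil hE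
  refine ⟨pvCut (l' :: ls') (0, e),
    ((pvF true (pvMask ls')).map Nat.succ |>.zip es).map (pvCut (l' :: ls')), ?_, ?_⟩
  · unfold pvB
    rw [hm, pvF_cons, hEeq]
    simp
  · unfold pvB
    rw [pvMask_cons l, hm, h, pvF_cons, pvF_cons, pvE_cons, hEeq]
    simp
    refine ⟨?_, ?_⟩
    · simp only [pvCut, List.drop_zero, Nat.sub_zero]
      rw [List.take_succ_cons, List.take_succ_cons, pvJoin_cons_cons]
    · rw [← List.map_map (g := Nat.succ) (f := Nat.succ), pvCut_shift]

theorem pvGroupby_cons (l : String) (ls : List String) :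
    pvGroupby (l :: ls) =
      (pvIsTably l, l :: ls.takeWhile (fun x => pvIsTably x == pvIsTably l)) ::
        pvGroupby (ls.dropWhile (fun x => pvIsTably x == pvIsTably l)) := by
  rw [pvGroupby]
theorem pvAlt_cons_true (l : String) (ls : List String) (h : pvIsTably l = true) :
    pvAlt (l :: ls) =
      PySem.Str.join "\n" (l :: ls.takeWhile (fun x => pvIsTably x)) ::
        pvAlt (ls.dropWhile (fun x => pvIsTably x)) := by
  simp [pvAlt, pvGroupby_cons, h]
theorem pvAlt_cons_false (l : String) (ls : List String) (h : pvIsTably l = false) :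
    pvAlt (l :: ls) = pvAlt (ls.dropWhile (fun x => !pvIsTably x)) := by
  simp [pvAlt, pvGroupby_cons, h]
theorem pvAlt_dropWhile (ls : List String) :
    pvAlt (ls.dropWhile (fun x => !pvIsTably x)) = pvAlt ls := by
  cases ls with
  | nil => simp
  | cons l ls =>
      cases h : pvIsTably l with
      | true => simp [h]
      | false =>
          rw [List.dropWhile_cons, pvAlt_cons_false l ls h]
          simp [h]

theorem pvGroupby_nil : pvGroupby [] = [] := by rw [pvGroupby]
theorem pvAlt_nil_eq : pvAlt [] = pvB [] := by
  simp [pvAlt, pvGroupby_nil, pvB, pvF, pvE, pvMask]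
theorem pvAlt_eq_pvB (ls : List String) : pvAlt ls = pvB ls := by
  induction ls with
  | nil => exact pvAlt_nil_eq
  | cons l ls ih =>
      cases h : pvIsTably l with
      | false =>
          rw [pvAlt_cons_false l ls h, pvAlt_dropWhile, ih, pvB_cons_false l ls h]
      | true =>
          cases ls with
          | nil =>
              rw [pvAlt_cons_true l [] h]
              simp only [List.takeWhile_nil, List.dropWhile_nil]
              rw [pvJoin_singleton, pvB_cons_true_stop l [] h (by simp [pvMask])]
              rw [ih]
          | cons l' ls' =>
              cases h' : pvIsTably l' with
              | false =>
                  rw [pvAlt_cons_true l (l' :: ls') h]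
                  rw [List.takeWhile_cons_of_neg (by simp [h']),
                      List.dropWhile_cons_of_neg (by simp [h'])]
                  rw [pvJoin_singleton, ih, pvB_cons_true_stop l (l' :: ls') h
                      (by simp [pvMask, h'])]
              | true =>
                  obtain ⟨hh, tt, e1, e2⟩ := pvB_cons_true_true l l' ls' h h'
                  rw [pvAlt_cons_true l (l' :: ls') h,
                      List.takeWhile_cons_of_pos (by simp [h']),
                      List.dropWhile_cons_of_pos (by simp [h']),
                      pvJoin_cons_cons, e2]
                  have e1' : pvAlt (l' :: ls') = hh :: tt := by rw [ih, e1]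
                  rw [pvAlt_cons_true l' ls' h'] at e1'
                  injection e1' with eh et
                  rw [eh, et]

-- A's loop invariant against the run decomposition
theorem pvMain (ls : List String) :
    (∀ t : List String, pvFinish (ls.foldl pvStep (t, [])) = t ++ pvAlt ls) ∧
    (∀ (t c : List String), c ≠ [] →
      pvFinish (ls.foldl pvStep (t, c)) =
        t ++ PySem.Str.join "\n" (c ++ ls.takeWhile (fun x => pvIsTably x)) ::
          pvAlt (ls.dropWhile (fun x => pvIsTably x))) := by
  induction ls with
  | nil =>
      refine ⟨fun t => by simp [pvFinish, pvAlt, pvGroupby], fun t c hc => by simp [pvFinish, hc, pvAlt, pvGroupby]⟩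
  | cons l ls ih =>
      obtain ⟨ihP, ihQ⟩ := ih
      constructor
      · intro t
        cases h : pvIsTably l with
        | true =>
            rw [List.foldl_cons]
            have hstep : pvStep (t, []) l = (t, [l]) := by simp [pvStep, h]
            rw [hstep, ihQ t [l] (by simp), pvAlt_cons_true l ls h]
            simp
        | false =>
            rw [List.foldl_cons]
            have hstep : pvStep (t, []) l = (t, []) := by simp [pvStep, h]
            rw [hstep, ihP t, pvAlt_cons_false l ls h, pvAlt_dropWhile]
      · intro t c hc
        cases h : pvIsTably l with
        | true =>
            rw [List.foldl_cons]
            have hstep : pvStep (t, c) l = (t, c ++ [l]) := by simp [pvStep, h]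
            rw [hstep, ihQ t (c ++ [l]) (by simp)]
            simp [h]
        | false =>
            rw [List.foldl_cons]
            have hstep : pvStep (t, c) l = (t ++ [PySem.Str.join "\n" c], []) := by
              simp [pvStep, h, hc]
            rw [hstep, ihP]
            simp [h, pvAlt_cons_false l ls h, pvAlt_dropWhile]

-- cast glue: a filter over the Int image of a Nat list is the image of a Nat filter
theorem pvFilter_cast (p : Int → Bool) (q : Nat → Bool) (l : List Nat)
    (hp : ∀ k ∈ l, p (k : Int) = q k) :
    (l.map (fun (k : Nat) => (k : Int))).filter p = (l.filter q).map (fun (k : Nat) => (k : Int)) := by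
  induction l with
  | nil => rfl
  | cons a t ih =>
      have ha := hp a (List.mem_cons_self)
      have ht := fun k hk => hp k (List.mem_cons_of_mem a hk)
      rw [List.map_cons, List.filter_cons, List.filter_cons, ha, ih ht]
      split <;> simp

theorem pvAltPort_eq_pvB (text : String) :
    extract_tables_from_text_alt text = pvB ((PySem.Str.split? text "\n").getD []) := by
  unfold extract_tables_from_text_alt pvB
  dsimp only
  set ls := (PySem.Str.split? text "\n").getD [] with hls
  have hmask : ls.map (fun l => PySem.Str.isIn "  " l || PySem.Str.isIn "\t" l) = pvMask ls := rfl
  have hml : (pvMask ls).length = ls.length := by simp [pvMask]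
  have hlen : PySem.List.len ls = (ls.length : Int) := by simp [PySem.List.len_eq]
  rw [hmask, hlen, PySem.List.pyRange_zero_nat]
  rw [pvFilter_cast _ (fun i => (pvMask ls).getD i false &&
        (if i == 0 then !false else !((pvMask ls).getD (i - 1) false))) _ ?hs]
  case hs =>
    intro k _
    cases k with
    | zero => simp [PySem.List.pyGetD_zero]
    | succ j =>
        rw [show ((j + 1 : Nat) : Int) - 1 = ((j : Nat) : Int) from by push_cast; ring]
        rw [PySem.List.pyGetD_natCast, PySem.List.pyGetD_natCast]
        rw [show (((j + 1 : Nat) : Int) == 0) = false from by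
          rw [beq_eq_false_iff_ne]; push_cast; omega]
        simp
  rw [pvFilter_cast _ (fun i => (pvMask ls).getD i false &&
        (i == (pvMask ls).length - 1 || !((pvMask ls).getD (i + 1) false))) _ ?he]
  case he =>
    intro k hk
    rw [List.mem_range] at hk
    have h1 : ((k : Int) == (ls.length : Int) - 1) = (k == (pvMask ls).length - 1) := by
      rw [hml]
      have : ((k : Int) = (ls.length : Int) - 1) ↔ (k = ls.length - 1) := by omega
      simp [this]
    have h2 : ((k : Int) + 1) = ((k + 1 : Nat) : Int) := by push_cast; ring
    rw [h2]
    simp only [PySem.List.pyGetD_natCast, h1]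
  have hSF : (List.filter (fun i => (pvMask ls).getD i false &&
        (if i == 0 then !false else !((pvMask ls).getD (i - 1) false))) (List.range ls.length))
      = pvF false (pvMask ls) := by
    unfold pvF; rw [hml]
  have hEF : (List.filter (fun i => (pvMask ls).getD i false &&
        (i == (pvMask ls).length - 1 || !((pvMask ls).getD (i + 1) false))) (List.range ls.length))
      = pvE (pvMask ls) := by
    unfold pvE; rw [hml]
  rw [hSF, hEF, List.zip_map, List.map_map]
  apply List.map_congr_left
  intro p _
  obtain ⟨s, e⟩ := p
  simp only [Function.comp_apply, Prod.map_apply]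
  have hse : ((e : Int) + 1) = ((e + 1 : Nat) : Int) := by push_cast; ring
  rw [hse, PySem.List.slice_natCast]
  unfold pvCut
  rfl

-- ===== VERDICT (by name: the statement is the Claim_ definition above) =====
theorem extract_tables_from_text_spec : Claim_equal_extract_tables_from_text := by
  intro text _
  show extract_tables_from_text text = extract_tables_from_text_alt text
  rw [pvAltPort_eq_pvB, ← pvAlt_eq_pvB]
  exact (pvMain ((PySem.Str.split? text "\n").getD [])).1 []
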